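-- pv_equiv track=rewrite | github.com/kcokros/baginasi_mbg | app.py | _dedup_columns
-- ===== SOURCE A (Python) =====
-- from typing import Dict, List, Tuple, Optional
--
-- def _dedup_columns(cols: List[str]) -> List[str]:
--     """Ensure column labels are unique by suffixing duplicates with .1, .2, ..."""
--     seen, out = {}, []
--     for c in cols:
--         if c in seen:
--             seen[c] += 1
--             out.append(f"{c}.{seen[c]}")
--         else:
--             seen[c] = 0
--             out.append(c)
--     return out
-- ===== SOURCE B (Python) =====
-- def _dedup_columns(cols):
--     """Ensure column labels are unique by suffixing duplicates with .1, .2, ..."""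
--     groups = {}
--     for i, c in enumerate(cols):
--         groups.setdefault(c, []).append(i)
--     out = [None] * len(cols)
--     for c, idxs in groups.items():
--         for j, i in enumerate(idxs):
--             out[i] = c if j == 0 else f"{c}.{j}"
--     return out
-- ===== Notes on version B (the rewrite author's own statement) =====
-- stated objective: alternative
-- what changed: Replaces the single running-counter pass with an index-first decomposition: first group all positions by label into a dict, then number each group and assign labels (bare at the group's first position, suffixed '.j' afterwards) into a preallocated output list by original index.
import Mathlib
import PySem

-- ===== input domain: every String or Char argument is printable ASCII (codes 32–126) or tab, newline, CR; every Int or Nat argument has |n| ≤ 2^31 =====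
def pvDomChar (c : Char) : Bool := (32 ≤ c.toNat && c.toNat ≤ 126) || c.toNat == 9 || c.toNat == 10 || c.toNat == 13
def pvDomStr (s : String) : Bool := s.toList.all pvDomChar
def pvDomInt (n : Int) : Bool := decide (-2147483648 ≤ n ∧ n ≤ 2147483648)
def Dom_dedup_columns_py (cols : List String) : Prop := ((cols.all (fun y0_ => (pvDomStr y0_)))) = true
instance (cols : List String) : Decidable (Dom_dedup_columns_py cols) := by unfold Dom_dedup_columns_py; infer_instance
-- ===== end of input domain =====

-- B replaces A's single running-counter pass by an index-first decomposition (group all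
-- positions by label, then number each group and assign by original index); objective: alternative.

-- ===== PORT A =====
-- seen is a dict str -> int; out is built by appending
def dedup_columns_py (cols : List String) : List String :=
  (cols.foldl
    (fun (st : PySem.Dict String Int × List String) c =>
      match st.1.get? c with
      | some v => (st.1.insert c (v + 1), st.2 ++ [c ++ "." ++ PySem.Int.toStr (v + 1)])
      | none   => (st.1.insert c 0, st.2 ++ [c]))
    (PySem.Dict.empty, [])).2

-- ===== PORT B =====
-- groups : dict str -> list of positions (setdefault(c, []).append(i) = modify c [] (· ++ [i]));
-- out = [None] * len(cols): every slot is assigned below, so the "" placeholder never survives;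
-- out[i] = v is pySetD (exact here: the position i always comes from enumerate(cols), hence in range)
def dedup_columns_py_alt (cols : List String) : List String :=
  let groups : PySem.Dict String (List Int) :=
    (PySem.List.enumerate cols).foldl
      (fun d p => d.modify p.2 [] (fun l => l ++ [p.1])) PySem.Dict.empty
  let out0 : List String := List.replicate cols.length ""
  groups.items.foldl
    (fun out g =>
      (PySem.List.enumerate g.2).foldl
        (fun out q =>
          PySem.List.pySetD out q.2
            (if q.1 == 0 then g.1 else g.1 ++ "." ++ PySem.Int.toStr q.1))
        out)
    out0

-- ===== PRECONDITION & SPEC =====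
def Spec_dedup_columns_py (cols : List String) (out : List String) : Prop := out = dedup_columns_py_alt cols
instance (cols : List String) (out : List String) : Decidable (Spec_dedup_columns_py cols out) := by unfold Spec_dedup_columns_py; infer_instance

-- ===== CLAIM (what is proved, stated in full; the proofs are below) =====
def Claim_equal_dedup_columns_py : Prop := ∀ (cols : List String), Dom_dedup_columns_py cols → Spec_dedup_columns_py cols (dedup_columns_py cols)

-- ===== LEMMAS AND PROOFS =====

def specFrom : List String → List String → List String
  | _, [] => []
  | p, c :: rs =>
      (if p.count c = 0 then c else c ++ "." ++ PySem.Int.toStr (p.count c)) :: specFrom (p ++ [c]) rs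

theorem length_specFrom (l p : List String) : (specFrom p l).length = l.length := by
  induction l generalizing p with
  | nil => rfl
  | cons c rs ih => simp [specFrom, ih]

theorem getElem?_specFrom (l : List String) (p : List String) (i : Nat) (h : i < l.length) :
    (specFrom p l)[i]? =
      some (if ((p ++ l.take i).count l[i]) = 0 then l[i]
            else l[i] ++ "." ++ PySem.Int.toStr ((p ++ l.take i).count l[i])) := by
  induction l generalizing p i with
  | nil => simp at h
  | cons c rs ih =>
    cases i with
    | zero => simp [specFrom]
    | succ i =>
      have h' : i < rs.length := by simpa using h
      simpa [specFrom, List.append_assoc] using ih (p ++ [c]) i h'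

theorem A_loop (rest : List String) (seen : PySem.Dict String Int) (out p : List String)
    (hinv : ∀ c, seen.get? c = if p.count c = 0 then none else some ((p.count c : Int) - 1)) :
    (rest.foldl
      (fun (st : PySem.Dict String Int × List String) c =>
        match st.1.get? c with
        | some v => (st.1.insert c (v + 1), st.2 ++ [c ++ "." ++ PySem.Int.toStr (v + 1)])
        | none   => (st.1.insert c 0, st.2 ++ [c]))
      (seen, out)).2 = out ++ specFrom p rest := by
  induction rest generalizing seen out p with
  | nil => simp [specFrom]
  | cons c rs ih =>
    have hc := hinv c
    by_cases h0 : p.count c = 0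
    · rw [if_pos h0] at hc
      have hinv' : ∀ c', (seen.insert c 0).get? c' =
          if (p ++ [c]).count c' = 0 then none else some (((p ++ [c]).count c' : Int) - 1) := by
        intro c'
        rw [PySem.Dict.get?_insert]
        by_cases hcc : c' = c
        · subst hcc
          simp [List.count_append, h0]
        · simp [hcc, hinv c', List.count_append, Ne.symm hcc]
      simp only [List.foldl_cons, hc]
      rw [ih _ _ _ hinv']
      simp [specFrom, h0]
    · rw [if_neg h0] at hc
      have hinv' : ∀ c', (seen.insert c ((p.count c : Int) - 1 + 1)).get? c' =
          if (p ++ [c]).count c' = 0 then none else some (((p ++ [c]).count c' : Int) - 1) := by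
        intro c'
        rw [PySem.Dict.get?_insert]
        by_cases hcc : c' = c
        · subst hcc
          have : (p ++ [c']).count c' = p.count c' + 1 := by simp [List.count_append]
          rw [this]
          simp
        · simp [hcc, hinv c', List.count_append, Ne.symm hcc]
      simp only [List.foldl_cons, hc]
      rw [ih _ _ _ hinv']
      have : ((p.count c : Int) - 1 + 1) = (p.count c : Int) := by ring
      simp [specFrom, h0, this]

theorem A_eq_specFrom (cols : List String) : dedup_columns_py cols = specFrom [] cols := by
  unfold dedup_columns_py
  rw [A_loop cols PySem.Dict.empty [] []]
  · simp
  · intro c; simp [PySem.Dict.get?_empty]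

def idxF (l : List (Int × String)) (c : String) : List Int :=
  (l.filter (fun p => p.2 == c)).map (·.1)

theorem getElem?_idxF (xs : List String) (s : Int) (i : Nat) (h : i < xs.length) :
    (idxF (PySem.List.enumerate xs s) xs[i])[(xs.take i).count xs[i]]? = some (s + i) := by
  induction xs generalizing s i with
  | nil => simp at h
  | cons x rest ih =>
    rw [PySem.List.enumerate_cons]
    cases i with
    | zero => simp [idxF, List.filter_cons]
    | succ i =>
      have h' : i < rest.length := by simpa using h
      have hg : (x :: rest)[i + 1] = rest[i] := by simp
      rw [hg]
      by_cases hx : x = rest[i]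
      · have : (idxF ((s, x) :: PySem.List.enumerate rest (s + 1)) rest[i])
            = s :: idxF (PySem.List.enumerate rest (s + 1)) rest[i] := by
          simp [idxF, List.filter_cons, hx]
        rw [this]
        have hc : ((x :: rest).take (i + 1)).count rest[i]
            = (rest.take i).count rest[i] + 1 := by
          simp [List.count_cons, hx]
        rw [hc, List.getElem?_cons_succ, ih (s + 1) i h']
        congr 1; push_cast; ring
      · have : (idxF ((s, x) :: PySem.List.enumerate rest (s + 1)) rest[i])
            = idxF (PySem.List.enumerate rest (s + 1)) rest[i] := by
          simp [idxF, List.filter_cons, hx]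
        rw [this]
        have hc : ((x :: rest).take (i + 1)).count rest[i]
            = (rest.take i).count rest[i] := by
          simp [List.count_cons, hx]
        rw [hc]
        have := ih (s + 1) i h'
        rw [this]
        congr 1
        omega

theorem mem_idxF (xs : List String) (c : String) (x : Int) (hx : x ∈ idxF (PySem.List.enumerate xs 0) c) :
    ∃ (k : Nat) (hk : k < xs.length), x = (k : Int) ∧ xs[k] = c := by
  simp only [idxF, List.mem_map, List.mem_filter] at hx
  obtain ⟨p, ⟨hp, hpc⟩, hpx⟩ := hx
  rw [PySem.List.mem_enumerate_iff] at hp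
  obtain ⟨k, hk, rfl⟩ := hp
  exact ⟨k, hk, by omega, by simpa using hpc⟩

theorem getD_foldl_modify_snd (l : List (Int × String)) (d : PySem.Dict String (List Int)) (c : String) :
    (l.foldl (fun d p => d.modify p.2 [] (fun t => t ++ [p.1])) d).getD c []
      = d.getD c [] ++ idxF l c := by
  induction l generalizing d with
  | nil => simp [idxF]
  | cons p rest ih =>
    rw [List.foldl_cons, ih]
    by_cases h : p.2 = c
    · rw [PySem.Dict.getD_modify]
      simp [idxF, List.filter_cons, h]
    · rw [PySem.Dict.getD_modify]
      simp [idxF, List.filter_cons, h, Ne.symm h]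

theorem groups_getD (cols : List String) (c : String) :
    ((PySem.List.enumerate cols).foldl
      (fun d p => d.modify p.2 [] (fun l => l ++ [p.1])) (PySem.Dict.empty : PySem.Dict String (List Int))).getD c []
    = idxF (PySem.List.enumerate cols) c := by
  rw [getD_foldl_modify_snd]
  simp [PySem.Dict.getD_empty]

theorem groups_keys (cols : List String) :
    ((PySem.List.enumerate cols).foldl
      (fun d p => d.modify p.2 [] (fun l => l ++ [p.1])) (PySem.Dict.empty : PySem.Dict String (List Int))).keys
    = PySem.Set.ofList cols := by
  rw [PySem.Dict.keys_foldl_modify_key]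
  simp [PySem.List.map_snd_enumerate, PySem.Set.update_nil_left, PySem.Dict.keys_empty]

def setAll (o : List String) (ws : List (Int × String)) : List String :=
  ws.foldl (fun o w => PySem.List.pySetD o w.1 w.2) o

theorem length_setAll (o : List String) (ws : List (Int × String)) :
    (setAll o ws).length = o.length := by
  induction ws generalizing o with
  | nil => rfl
  | cons w rest ih => simp [setAll, List.foldl_cons] at *; rw [ih, PySem.List.length_pySetD]

theorem getElem?_setAll_of_not_mem (ws : List (Int × String)) (o : List String) (i : Nat)
    (hpos : ∀ w ∈ ws, 0 ≤ w.1)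
    (h : ∀ w ∈ ws, w.1 ≠ (i : Int)) : (setAll o ws)[i]? = o[i]? := by
  induction ws generalizing o with
  | nil => rfl
  | cons w rest ih =>
    have hw : w.1 ≠ (i : Int) := h w (by simp)
    have h0 : 0 ≤ w.1 := hpos w (by simp)
    have h1 : (PySem.List.pySetD o w.1 w.2)[i]? = o[i]? := by
      rw [PySem.List.pySetD_of_nonneg _ _ h0]
      exact List.getElem?_set_ne (by omega)
    calc (setAll o (w :: rest))[i]? = (setAll (PySem.List.pySetD o w.1 w.2) rest)[i]? := rfl
      _ = (PySem.List.pySetD o w.1 w.2)[i]? := ih _ (fun x hx => hpos x (by simp [hx])) (fun x hx => h x (by simp [hx]))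
      _ = o[i]? := h1

theorem getElem?_setAll_of_mem (ws : List (Int × String)) (o : List String) (i : Nat) (v : String)
    (hpos : ∀ w ∈ ws, 0 ≤ w.1)
    (hnd : (ws.map (·.1)).Nodup) (hmem : ((i : Int), v) ∈ ws) (hlen : i < o.length) :
    (setAll o ws)[i]? = some v := by
  induction ws generalizing o with
  | nil => simp at hmem
  | cons w rest ih =>
    rcases List.mem_cons.mp hmem with heq | hrest
    · subst heq
      have hni : ∀ x ∈ rest, x.1 ≠ (i : Int) := by
        intro x hx
        have := (List.nodup_cons.mp hnd).1
        intro hx1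
        exact this (by simpa [hx1] using List.mem_map_of_mem (f := (·.1)) hx)
      calc (setAll o (((i : Int), v) :: rest))[i]?
          = (setAll (PySem.List.pySetD o (i : Int) v) rest)[i]? := rfl
        _ = (PySem.List.pySetD o (i : Int) v)[i]? :=
            getElem?_setAll_of_not_mem _ _ _ (fun x hx => hpos x (by simp [hx])) hni
        _ = some v := by
            rw [PySem.List.pySetD_of_nonneg _ _ (by omega)]
            simp [List.getElem?_set_self, hlen]
    · have hw : w.1 ≠ (i : Int) := by
        have := (List.nodup_cons.mp hnd).1
        intro hx1
        exact this (by simpa [← hx1] using List.mem_map_of_mem (f := (·.1)) hrest)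
      have := ih (PySem.List.pySetD o w.1 w.2) (fun x hx => hpos x (by simp [hx]))
        (List.nodup_cons.mp hnd).2 hrest (by rw [PySem.List.length_pySetD]; exact hlen)
      exact this

def wval (c : String) (j : Int) : String :=
  if j == 0 then c else c ++ "." ++ PySem.Int.toStr j

def wrts (items : List (String × List Int)) : List (Int × String) :=
  items.flatMap (fun g => (PySem.List.enumerate g.2).map (fun q => (q.2, wval g.1 q.1)))

theorem setAll_append (o : List String) (a b : List (Int × String)) :
    setAll o (a ++ b) = setAll (setAll o a) b := by
  simp [setAll, List.foldl_append]

theorem outer_eq_setAll (items : List (String × List Int)) (o : List String) :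
    items.foldl
      (fun out g =>
        (PySem.List.enumerate g.2).foldl
          (fun out q =>
            PySem.List.pySetD out q.2
              (if q.1 == 0 then g.1 else g.1 ++ "." ++ PySem.Int.toStr q.1))
          out) o
    = setAll o (wrts items) := by
  induction items generalizing o with
  | nil => rfl
  | cons g rest ih =>
    rw [List.foldl_cons, ih]
    have hinner : (PySem.List.enumerate g.2).foldl
        (fun out q => PySem.List.pySetD out q.2
          (if q.1 == 0 then g.1 else g.1 ++ "." ++ PySem.Int.toStr q.1)) o
        = setAll o ((PySem.List.enumerate g.2).map (fun q => (q.2, wval g.1 q.1))) := by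
      rw [setAll, List.foldl_map]
      rfl
    rw [hinner,
      show wrts (g :: rest)
        = (PySem.List.enumerate g.2).map (fun q => (q.2, wval g.1 q.1)) ++ wrts rest from rfl,
      setAll_append]

theorem nodup_idxF (xs : List String) (s : Int) (c : String) :
    (idxF (PySem.List.enumerate xs s) c).Nodup := by
  have h1 : (PySem.List.enumerate xs s).Pairwise (fun p q => p.1 < q.1) :=
    PySem.List.pairwise_lt_enumerate xs s
  have h2 := h1.filter (fun p => p.2 == c)
  rw [idxF, List.nodup_iff_pairwise_ne (l := _), List.pairwise_map]
  exact h2.imp (fun h => ne_of_lt h)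

theorem nodup_wrts_fst (cols : List String) :
    ((wrts ((PySem.Set.ofList cols).map
        (fun c => (c, idxF (PySem.List.enumerate cols) c)))).map (·.1)).Nodup := by
  have hrw : (wrts ((PySem.Set.ofList cols).map
        (fun c => (c, idxF (PySem.List.enumerate cols) c)))).map (·.1)
      = (PySem.Set.ofList cols).flatMap (fun c => idxF (PySem.List.enumerate cols) c) := by
    rw [wrts, List.map_flatMap, List.flatMap_map]
    congr 1
    funext c
    rw [List.map_map]
    exact PySem.List.map_snd_enumerate _ _
  rw [hrw, List.nodup_flatMap]
  constructor
  · intro c _; exact nodup_idxF cols 0 c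
  · have hnd : (PySem.Set.ofList cols).Nodup := PySem.Set.nodup_ofList cols
    refine hnd.imp ?_
    intro c c' hne
    intro x hx hx'
    obtain ⟨k, hk, rfl, hc⟩ := mem_idxF cols c x hx
    obtain ⟨k', hk', hkk, hc'⟩ := mem_idxF cols c' _ hx'
    have : k = k' := by omega
    subst this
    exact hne (hc ▸ hc')

theorem pos_wrts (cols : List String)
    (w : Int × String)
    (hw : w ∈ wrts ((PySem.Set.ofList cols).map
        (fun c => (c, idxF (PySem.List.enumerate cols) c)))) : 0 ≤ w.1 := by
  simp only [wrts, List.mem_flatMap, List.mem_map] at hw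
  obtain ⟨g, ⟨c, hc, rfl⟩, q, hq, rfl⟩ := hw
  rw [PySem.List.mem_enumerate_iff] at hq
  obtain ⟨k, hk, rfl⟩ := hq
  obtain ⟨k', hk', heq, _⟩ := mem_idxF cols c _ (List.getElem_mem hk)
  simp [heq]

theorem B_eq_specFrom (cols : List String) : dedup_columns_py_alt cols = specFrom [] cols := by
  simp only [dedup_columns_py_alt]
  have hknd : ((PySem.List.enumerate cols).foldl
      (fun d p => d.modify p.2 [] (fun l => l ++ [p.1]))
      (PySem.Dict.empty : PySem.Dict String (List Int))).keys.Nodup := by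
    exact PySem.Dict.nodup_keys_foldl_modify_key _ (fun (p : Int × String) => p.2) [] (fun _ (p : Int × String) l => l ++ [p.1]) _
      (by simp [PySem.Dict.keys_empty])
  have hitems : ((PySem.List.enumerate cols).foldl
      (fun d p => d.modify p.2 [] (fun l => l ++ [p.1]))
      (PySem.Dict.empty : PySem.Dict String (List Int))).items
      = (PySem.Set.ofList cols).map (fun c => (c, idxF (PySem.List.enumerate cols) c)) := by
    rw [PySem.Dict.items_eq_map_keys _ hknd [], groups_keys]
    exact List.map_congr_left (fun c _ => by rw [groups_getD])
  rw [hitems, outer_eq_setAll]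
  apply List.ext_getElem?
  intro i
  by_cases h : i < cols.length
  · have hmem : ((i : Int), wval cols[i] ((cols.take i).count cols[i] : Int))
        ∈ wrts ((PySem.Set.ofList cols).map
          (fun c => (c, idxF (PySem.List.enumerate cols) c))) := by
      have hq := getElem?_idxF cols 0 i h
      obtain ⟨hjlt, hjeq⟩ := List.getElem?_eq_some_iff.mp hq
      simp only [wrts, List.mem_flatMap, List.mem_map]
      refine ⟨(cols[i], idxF (PySem.List.enumerate cols) cols[i]),
        ⟨cols[i], (PySem.Set.mem_ofList _ _).mpr (List.getElem_mem h), rfl⟩,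
        ((0 : Int) + ((cols.take i).count cols[i] : Int),
          (idxF (PySem.List.enumerate cols) cols[i])[(cols.take i).count cols[i]]), ?_, ?_⟩
      · rw [PySem.List.mem_enumerate_iff]
        exact ⟨_, hjlt, rfl⟩
      · rw [hjeq]
        simp
    have hL := getElem?_setAll_of_mem _ (List.replicate cols.length "") i _
      (pos_wrts cols) (nodup_wrts_fst cols) hmem (by simpa using h)
    rw [hL, getElem?_specFrom cols [] i h]
    by_cases hj : (cols.take i).count cols[i] = 0 <;> simp [wval, hj]
  · rw [List.getElem?_eq_none (by rw [length_setAll]; simpa using Nat.le_of_not_lt h),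
        List.getElem?_eq_none (by rw [length_specFrom]; exact Nat.le_of_not_lt h)]

-- ===== VERDICT (by name: the statement is the Claim_ definition above) =====
theorem dedup_columns_py_spec : Claim_equal_dedup_columns_py := by
  intro cols _
  unfold Spec_dedup_columns_py
  rw [A_eq_specFrom, B_eq_specFrom]
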